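-- pv_equiv track=rewrite | github.com/LarAguilar/Programando---Python | apnp/opcoes.py | f_AltD
-- ===== SOURCE A (Python) =====
-- def f_AltD(caracter):
--     # declaração de variaveis
--     espaco = " "
--     quantidade = 4
--     qtd_caracter = 1
--     saida = ""
--
--     #processamento
--     for i in range(quantidade, 0, -1):
--         saida += str(espaco) * (i-1) + str(caracter) * (qtd_caracter) + "\n"
--         qtd_caracter += 2
--
--     #declaração de variavel
--     qtd_caracter = 5
--
--     #processamento
--     for j in range(1, quantidade):
--         saida += str(espaco) * (j) + str(caracter) * (qtd_caracter) + "\n"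
--         qtd_caracter -= 2
--     return saida
-- ===== SOURCE B (Python) =====
-- def f_AltD(caracter):
--     # Build the top half as a list of rows, then mirror it (excluding the
--     # widest middle row) to form the bottom half; join once.
--     top = [" " * (4 - i) + str(caracter) * (2 * i - 1) + "\n" for i in range(1, 5)]
--     return "".join(top + top[-2::-1])
-- ===== Notes on version B (the rewrite author's own statement) =====
-- stated objective: simpler
-- what changed: Replaces A's two accumulator loops with running counters by building the four top-half rows as a list (row width a closed form of the index) and mirroring that list minus its last element to get the bottom half, joined once.
import Mathlib
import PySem

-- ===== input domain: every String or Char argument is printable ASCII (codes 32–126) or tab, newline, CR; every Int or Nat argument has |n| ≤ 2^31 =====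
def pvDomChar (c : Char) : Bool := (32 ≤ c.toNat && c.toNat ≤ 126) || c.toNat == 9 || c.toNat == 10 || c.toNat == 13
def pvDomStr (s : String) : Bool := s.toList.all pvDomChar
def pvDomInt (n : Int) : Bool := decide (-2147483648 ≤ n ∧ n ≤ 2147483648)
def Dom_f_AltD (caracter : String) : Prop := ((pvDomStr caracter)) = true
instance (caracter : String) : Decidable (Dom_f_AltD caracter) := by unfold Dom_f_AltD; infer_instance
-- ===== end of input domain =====

-- B replaces the two accumulator loops by building the top-half rows and mirroring them (decomposition change); same output.

-- ===== PORT A =====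
-- Port of A: two sequential foldl loops accumulating the output string and qtd_caracter.
def f_AltD (caracter : String) : String :=
  let espaco : List Char := [' ']
  let st1 := (PySem.List.pyRange 4 0 (-1)).foldl
    (fun (st : List Char × Int) i =>
      (st.1 ++ PySem.List.pyRepeat espaco (i - 1)
            ++ PySem.List.pyRepeat caracter.toList st.2 ++ ['\n'], st.2 + 2))
    ([], 1)
  let st2 := (PySem.List.pyRange 1 4 1).foldl
    (fun (st : List Char × Int) j =>
      (st.1 ++ PySem.List.pyRepeat espaco j
            ++ PySem.List.pyRepeat caracter.toList st.2 ++ ['\n'], st.2 - 2))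
    (st1.1, 5)
  String.ofList st2.1

-- ===== PORT B =====
-- Port of B: build the top-half rows, mirror them without the middle row, join once.
def f_AltD_alt (caracter : String) : String :=
  let top : List (List Char) :=
    (PySem.List.pyRange 1 5 1).map (fun i =>
      PySem.List.pyRepeat [' '] (4 - i)
        ++ PySem.List.pyRepeat caracter.toList (2 * i - 1) ++ ['\n'])
  String.ofList ((top ++ ((PySem.List.slice? top (some (-2)) none (-1)).getD [])).flatten)

-- ===== PRECONDITION & SPEC =====
def Spec_f_AltD (caracter : String) (out : String) : Prop := out = f_AltD_alt caracter
instance (caracter : String) (out : String) : Decidable (Spec_f_AltD caracter out) := by unfold Spec_f_AltD; infer_instance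

-- ===== CLAIM (what is proved, stated in full; the proofs are below) =====
def Claim_equal_f_AltD : Prop := ∀ (caracter : String), Dom_f_AltD caracter → Spec_f_AltD caracter (f_AltD caracter)

-- ===== LEMMAS AND PROOFS =====

-- ===== VERDICT (by name: the statement is the Claim_ definition above) =====
theorem f_AltD_spec : Claim_equal_f_AltD := by
  intro c _
  unfold Spec_f_AltD f_AltD f_AltD_alt
  simp [PySem.List.pyRange, PySem.List.pyRepeat, PySem.List.slice?, PySem.List.sliceIndices,
    List.range_succ, String.ofList]
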